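-- pv_equiv track=rewrite | github.com/hearues-zueke-github/python_programs | modulo_sequences/number_modulo_sequences_cyclic.py | get_one_full_cycle
-- ===== SOURCE A (Python) =====
-- def get_one_full_cycle(m):
--     complete_cycles = {}
--
--     for a in range(0, m):
--         for c in range(0, m):
--             calc_v = lambda x1: (a*x1+c)%m
--
--             mapping_dict = {}
--             for x1 in range(0, m):
--                 mapping_dict[x1] = calc_v(x1)
--
--             # get the full cycle lengths!
--             for k in mapping_dict:
--                 cycle = [k]
--                 while True:
--                     next_k = mapping_dict[cycle[-1]]
--                     if next_k in cycle:
--                         cycle.append(next_k)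
--                         break
--                     cycle.append(next_k)
--                 if cycle[0]==cycle[-1] and len(cycle)>2:
--                     complete_cycles[(a, c, k)] = cycle[:-1]
--
--     return complete_cycles
-- ===== SOURCE B (Python) =====
-- def get_one_full_cycle(m):
--     complete_cycles = {}
--     for a in range(m):
--         for c in range(m):
--             # compose f(x) = (a*x+c) % m with itself m times: f^m(x) = (A*x + C) % m
--             A, C = 1 % m, 0
--             for _ in range(m):
--                 A, C = (a * A) % m, (a * C + c) % m
--             # the image of f^m is exactly the set of periodic points of f
--             periodic = {(A * x + C) % m for x in range(m)}
--             for k in range(m):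
--                 if k in periodic:
--                     orbit = [k]
--                     x = (a * k + c) % m
--                     while x != k:
--                         orbit.append(x)
--                         x = (a * x + c) % m
--                     if len(orbit) >= 2:
--                         complete_cycles[(a, c, k)] = orbit
--     return complete_cycles
-- ===== Notes on version B (the rewrite author's own statement) =====
-- stated objective: faster
-- what changed: Per (a,c), B composes the linear map with itself m times in closed form, takes the image of f^m as the exact set of periodic points, and walks an orbit only from points known to lie on a cycle, eliminating A's per-key orbit walk with its quadratic list-membership scan.
import Mathlib
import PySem

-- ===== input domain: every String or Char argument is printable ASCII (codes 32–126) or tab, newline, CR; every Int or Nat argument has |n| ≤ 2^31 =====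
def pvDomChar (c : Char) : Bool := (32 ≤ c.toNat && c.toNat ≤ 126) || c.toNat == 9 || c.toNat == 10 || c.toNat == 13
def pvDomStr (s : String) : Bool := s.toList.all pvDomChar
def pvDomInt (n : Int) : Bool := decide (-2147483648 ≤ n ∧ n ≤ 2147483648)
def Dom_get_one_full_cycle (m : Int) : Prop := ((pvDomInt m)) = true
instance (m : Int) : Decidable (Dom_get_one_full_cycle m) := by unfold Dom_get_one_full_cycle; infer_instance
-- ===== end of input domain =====

-- B replaces A's per-key orbit walk with its quadratic list-membership scan by a per-(a,c)
-- closed-form composition of the linear map (the image of f^m is exactly the set of periodic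
-- points), walking orbits only from points proved to lie on a cycle (objective: faster).

-- ===== PORT A =====
-- A's inner `while True` loop; fuel m+1 is provably sufficient (the walk repeats within m steps).
-- next_k = mapping_dict[cycle[-1]]: the key is provably present (the dict is built over all
-- residues and every walked value is a residue), so the lookup is ported with getD.
def pvALoop (d : PySem.Dict Int Int) : Nat → List Int → List Int
  | 0, cycle => cycle
  | fuel+1, cycle =>
    let next_k := d.getD (PySem.List.pyGetD cycle (-1) 0) 0
    if cycle.contains next_k then cycle ++ [next_k]
    else pvALoop d fuel (cycle ++ [next_k])

def get_one_full_cycle (m : Int) : List (List Int × List Int) :=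
  ((PySem.List.pyRange 0 m 1).foldl (fun cc a =>
    (PySem.List.pyRange 0 m 1).foldl (fun cc c =>
      let mapping := (PySem.List.pyRange 0 m 1).foldl
        (fun d x1 => d.insert x1 (PySem.Int.mod (a * x1 + c) m)) PySem.Dict.empty
      (PySem.Dict.keys mapping).foldl (fun cc k =>
        let cycle := pvALoop mapping (m.toNat + 1) [k]
        if PySem.List.pyGetD cycle 0 0 = PySem.List.pyGetD cycle (-1) 0 ∧
            2 < PySem.List.len cycle then
          cc.insert [a, c, k] (PySem.List.slice cycle none (some (-1)))
        else cc) cc) cc) PySem.Dict.empty).items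

-- ===== PORT B =====
-- B's inner `while x != k` loop; fuel m is provably sufficient (only entered for periodic k).
def pvBWalk (m a c k : Int) : Nat → List Int → Int → List Int
  | 0, orbit, _ => orbit
  | fuel+1, orbit, x =>
    if x = k then orbit
    else pvBWalk m a c k fuel (orbit ++ [x]) (PySem.Int.mod (a * x + c) m)

def get_one_full_cycle_alt (m : Int) : List (List Int × List Int) :=
  ((PySem.List.pyRange 0 m 1).foldl (fun cc a =>
    (PySem.List.pyRange 0 m 1).foldl (fun cc c =>
      let ac := (PySem.List.pyRange 0 m 1).foldl
        (fun p _ => (PySem.Int.mod (a * p.1) m, PySem.Int.mod (a * p.2 + c) m))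
        (PySem.Int.mod 1 m, 0)
      let periodic : PySem.Set Int := PySem.Set.ofList
        ((PySem.List.pyRange 0 m 1).map (fun x => PySem.Int.mod (ac.1 * x + ac.2) m))
      (PySem.List.pyRange 0 m 1).foldl (fun cc k =>
        if PySem.Set.contains periodic k then
          let orbit := pvBWalk m a c k m.toNat [k] (PySem.Int.mod (a * k + c) m)
          if 2 ≤ PySem.List.len orbit then cc.insert [a, c, k] orbit else cc
        else cc) cc) cc) PySem.Dict.empty).items

-- ===== PRECONDITION & SPEC =====
def Spec_get_one_full_cycle (m : Int) (out : List (List Int × List Int)) : Prop := out = get_one_full_cycle_alt m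
instance (m : Int) (out : List (List Int × List Int)) : Decidable (Spec_get_one_full_cycle m out) := by unfold Spec_get_one_full_cycle; infer_instance

-- ===== CLAIM (what is proved, stated in full; the proofs are below) =====
def Claim_equal_get_one_full_cycle : Prop := ∀ (m : Int), Dom_get_one_full_cycle m → Spec_get_one_full_cycle m (get_one_full_cycle m)

-- ===== LEMMAS AND PROOFS =====

/-- The step function x ↦ (a*x+c) % m shared by both programs. -/
def pvF (m a c x : Int) : Int := PySem.Int.mod (a * x + c) m

/-- The first t points of the orbit of k under f. -/
def pvW (f : Int → Int) (k : Int) (t : Nat) : List Int := (List.range t).map (fun j => f^[j] k)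

theorem pvW_succ (f : Int → Int) (k : Int) (t : Nat) :
    pvW f k (t + 1) = pvW f k t ++ [f^[t] k] := by
  simp [pvW, List.range_succ]

theorem pvW_length (f : Int → Int) (k : Int) (t : Nat) : (pvW f k t).length = t := by
  simp [pvW]

theorem pvW_one (f : Int → Int) (k : Int) : pvW f k 1 = [k] := by
  simp [pvW]

theorem mem_pvW (f : Int → Int) (k x : Int) (t : Nat) :
    x ∈ pvW f k t ↔ ∃ j, j < t ∧ f^[j] k = x := by
  simp [pvW]; tauto

theorem pvW_getD_neg_one (f : Int → Int) (k : Int) (t : Nat) (ht : 1 ≤ t) :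
    PySem.List.pyGetD (pvW f k t) (-1) 0 = f^[t - 1] k := by
  obtain ⟨s, rfl⟩ := Nat.exists_eq_add_of_le ht
  rw [Nat.add_comm, pvW_succ, PySem.List.pyGetD_neg_one_append_singleton]
  simp

theorem pvW_getD_zero (f : Int → Int) (k : Int) (t : Nat) (ht : 1 ≤ t) :
    PySem.List.pyGetD (pvW f k t) 0 0 = k := by
  obtain ⟨s, rfl⟩ := Nat.exists_eq_add_of_le ht
  rw [Nat.add_comm]
  have h : pvW f k (s + 1) = k :: (List.range s).map (fun j => f^[j + 1] k) := by
    simp [pvW, List.range_succ_eq_map, Function.comp_def]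
  rw [h, PySem.List.pyGetD_zero_cons]

/-- Orbit points stay in [0, m). -/
theorem pvIter_bounds (m : Int) (f : Int → Int) (k : Int)
    (hf : ∀ x, 0 ≤ f x ∧ f x < m) (hk : 0 ≤ k ∧ k < m) :
    ∀ j : Nat, 0 ≤ f^[j] k ∧ f^[j] k < m := by
  intro j
  induction j with
  | zero => simpa using hk
  | succ n ih => rw [Function.iterate_succ_apply']; exact hf _

/-- Pigeonhole: the orbit repeats within m steps. -/
theorem pvRepeat_exists (m : Int) (f : Int → Int) (k : Int) (hm : 0 < m)
    (hb : ∀ j : Nat, 0 ≤ f^[j] k ∧ f^[j] k < m) :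
    ∃ t, t ≤ m.toNat ∧ f^[t] k ∈ pvW f k t := by
  have hmaps : ∀ j ∈ Finset.range (m.toNat + 1), (f^[j] k).toNat ∈ Finset.range m.toNat := by
    intro j _
    have := hb j
    simp only [Finset.mem_range]
    omega
  obtain ⟨i, hi, j, hj, hne, heq⟩ :=
    Finset.exists_ne_map_eq_of_card_lt_of_maps_to (by simp) hmaps
  simp only [Finset.mem_range] at hi hj
  have heq' : f^[i] k = f^[j] k := by
    have h1 := hb i; have h2 := hb j; omega
  rcases Nat.lt_or_ge i j with h | h
  · exact ⟨j, by omega, (mem_pvW f k _ j).2 ⟨i, h, heq'⟩⟩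
  · have h' : j < i := by omega
    exact ⟨i, by omega, (mem_pvW f k _ i).2 ⟨j, h', heq'.symm⟩⟩

/-- Unrolling A's while-loop: with the first-repeat index T it returns W T ++ [f^[T] k]. -/
theorem pvALoop_run (d : PySem.Dict Int Int) (f : Int → Int) (k : Int) (T : Nat)
    (hd : ∀ j, j < T → d.getD (f^[j] k) 0 = f^[j+1] k)
    (hQ : f^[T] k ∈ pvW f k T)
    (hmin : ∀ t, t < T → f^[t] k ∉ pvW f k t) :
    ∀ fuel t, 1 ≤ t → t ≤ T → T - t < fuel →
      pvALoop d fuel (pvW f k t) = pvW f k T ++ [f^[T] k] := by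
  intro fuel
  induction fuel with
  | zero => intro t h1 h2 h3; omega
  | succ n ih =>
    intro t h1 h2 h3
    have hnext : d.getD (PySem.List.pyGetD (pvW f k t) (-1) 0) 0 = f^[t] k := by
      rw [pvW_getD_neg_one f k t h1, hd (t-1) (by omega)]
      congr 1
      omega
    rcases Nat.eq_or_lt_of_le h2 with heq | hlt
    · subst heq
      rw [pvALoop]
      simp only [hnext]
      rw [if_pos (by simp only [List.contains_iff_mem]; exact hQ)]
    · rw [pvALoop]
      simp only [hnext]
      rw [if_neg, ← pvW_succ]
      · exact ih (t+1) (by omega) (by omega) (by omega)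
      · simp only [List.contains_iff_mem]
        exact fun hmem => hmin t hlt hmem

/-- Unrolling B's while-loop for a periodic point with least period T. -/
theorem pvBWalk_run (m a c k : Int) (T : Nat)
    (hstop : (pvF m a c)^[T] k = k)
    (hne : ∀ t, 1 ≤ t → t < T → (pvF m a c)^[t] k ≠ k) :
    ∀ fuel t, 1 ≤ t → t ≤ T → T - t < fuel →
      pvBWalk m a c k fuel (pvW (pvF m a c) k t) ((pvF m a c)^[t] k) = pvW (pvF m a c) k T := by
  intro fuel
  induction fuel with
  | zero => intro t h1 h2 h3; omega
  | succ n ih =>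
    intro t h1 h2 h3
    rcases Nat.eq_or_lt_of_le h2 with heq | hlt
    · subst heq
      rw [pvBWalk, if_pos hstop]
    · rw [pvBWalk, if_neg (hne t h1 hlt), ← pvW_succ]
      have hx : PySem.Int.mod (a * (pvF m a c)^[t] k + c) m = (pvF m a c)^[t+1] k := by
        rw [Function.iterate_succ_apply']; rfl
      rw [hx]
      exact ih (t+1) (by omega) (by omega) (by omega)

theorem pvMapping_items (m a c : Int) :
    ((PySem.List.pyRange 0 m 1).foldl
      (fun d x1 => d.insert x1 (PySem.Int.mod (a * x1 + c) m)) PySem.Dict.empty).items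
    = (PySem.List.pyRange 0 m 1).map (fun x => (x, pvF m a c x)) := by
  have h := PySem.Dict.items_foldl_insert_fresh (l := PySem.List.pyRange 0 m 1)
    (k := fun x => x) (v := fun x => PySem.Int.mod (a * x + c) m) (d := PySem.Dict.empty)
    (by intro x _; exact PySem.Dict.contains_empty x)
    (by simpa using PySem.List.nodup_pyRange_one 0 m)
  simpa [pvF] using h

theorem pvMapping_keys (m a c : Int) :
    PySem.Dict.keys ((PySem.List.pyRange 0 m 1).foldl
      (fun d x1 => d.insert x1 (PySem.Int.mod (a * x1 + c) m)) PySem.Dict.empty)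
    = PySem.List.pyRange 0 m 1 := by
  simp only [PySem.Dict.keys, pvMapping_items, List.map_map]
  exact List.map_id _

theorem pvMapping_getD (m a c x : Int) (hx : 0 ≤ x ∧ x < m) :
    ((PySem.List.pyRange 0 m 1).foldl
      (fun d x1 => d.insert x1 (PySem.Int.mod (a * x1 + c) m)) PySem.Dict.empty).getD x 0
    = pvF m a c x := by
  apply PySem.Dict.getD_of_mem_items
  · rw [pvMapping_items]
    exact List.mem_map.2 ⟨x, (PySem.List.mem_pyRange_one).2 ⟨hx.1, hx.2⟩, rfl⟩
  · rw [pvMapping_keys]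
    exact PySem.List.nodup_pyRange_one 0 m

theorem pvFoldl_const {α β : Type} (l : List α) (g : β → β) (init : β) :
    l.foldl (fun p _ => g p) init = g^[l.length] init := by
  induction l generalizing init with
  | nil => rfl
  | cons x xs ih => simp [List.foldl_cons, ih, Function.iterate_succ_apply]

/-- B's composition loop computes f^[n] as a linear map. -/
theorem pvLinear_iter (m a c : Int) (hm : 0 < m) :
    ∀ (n : Nat) (x : Int), 0 ≤ x → x < m →
      PySem.Int.mod
        (((fun (p : Int × Int) => (PySem.Int.mod (a * p.1) m, PySem.Int.mod (a * p.2 + c) m))^[n]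
            (PySem.Int.mod 1 m, 0)).1 * x
          + ((fun (p : Int × Int) => (PySem.Int.mod (a * p.1) m, PySem.Int.mod (a * p.2 + c) m))^[n]
            (PySem.Int.mod 1 m, 0)).2) m
      = (pvF m a c)^[n] x := by
  intro n
  induction n with
  | zero =>
    intro x hx0 hxm
    simp only [Function.iterate_zero, id_eq]
    rw [PySem.Int.mod_eq_emod_of_pos hm, PySem.Int.mod_eq_emod_of_pos hm]
    rw [add_zero, Int.mul_emod, Int.emod_emod_of_dvd _ dvd_rfl, ← Int.mul_emod]
    simpa using Int.emod_eq_of_lt hx0 hxm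
  | succ n ih =>
    intro x hx0 hxm
    rw [Function.iterate_succ_apply']
    set p := (fun (p : Int × Int) => (PySem.Int.mod (a * p.1) m, PySem.Int.mod (a * p.2 + c) m))^[n]
            (PySem.Int.mod 1 m, 0) with hp
    rw [Function.iterate_succ_apply', ← ih x hx0 hxm]
    show PySem.Int.mod (PySem.Int.mod (a * p.1) m * x + PySem.Int.mod (a * p.2 + c) m) m
      = pvF m a c (PySem.Int.mod (p.1 * x + p.2) m)
    unfold pvF
    repeat rw [PySem.Int.mod_eq_emod_of_pos hm]
    conv_lhs => rw [Int.add_emod, Int.mul_emod, Int.emod_emod_of_dvd _ dvd_rfl,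
      Int.emod_emod_of_dvd _ dvd_rfl, ← Int.mul_emod, ← Int.add_emod]
    conv_rhs => rw [Int.add_emod, Int.mul_emod, Int.emod_emod_of_dvd _ dvd_rfl, ← Int.mul_emod,
      ← Int.add_emod]
    ring_nf

/-- A point in the image of f^[m] is periodic. -/
theorem pvPer_of_image (m : Int) (f : Int → Int) (x k : Int) (hm : 0 < m)
    (hb : ∀ j : Nat, 0 ≤ f^[j] x ∧ f^[j] x < m)
    (hk : f^[m.toNat] x = k) :
    ∃ j : Nat, 1 ≤ j ∧ f^[j] k = k := by
  obtain ⟨t, htM, hmem⟩ := pvRepeat_exists m f x hm hb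
  obtain ⟨i, hit, hieq⟩ := (mem_pvW f x _ t).1 hmem
  refine ⟨t - i, by omega, ?_⟩
  have h1 : f^[t - i] k = f^[(t - i) + m.toNat] x := by
    rw [← hk, ← Function.iterate_add_apply]
  have h2 : (t - i) + m.toNat = (m.toNat - i) + t := by omega
  rw [h1, h2, Function.iterate_add_apply, ← hieq, ← Function.iterate_add_apply]
  have h3 : m.toNat - i + i = m.toNat := by omega
  rw [h3, hk]

/-- A periodic point is in the image of f^[M]. -/
theorem pvImage_of_per (f : Int → Int) (M j : Nat) (k : Int)
    (hj1 : 1 ≤ j) (hj : f^[j] k = k) :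
    ∃ t : Nat, f^[M] (f^[t] k) = k := by
  refine ⟨j * M - M, ?_⟩
  rw [← Function.iterate_add_apply]
  have h : M + (j * M - M) = j * M := by
    have : M ≤ j * M := Nat.le_mul_of_pos_left M (by omega)
    omega
  rw [h, Function.iterate_mul]
  exact Function.iterate_fixed hj M

/-- For each residue k, A's per-key body and B's per-key body agree. -/
theorem pvStep_eq (m a c k : Int) (hm : 0 < m) (hk : 0 ≤ k ∧ k < m)
    (cc : PySem.Dict (List Int) (List Int)) :
    (let mapping := (PySem.List.pyRange 0 m 1).foldl
        (fun d x1 => d.insert x1 (PySem.Int.mod (a * x1 + c) m)) PySem.Dict.empty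
     let cycle := pvALoop mapping (m.toNat + 1) [k]
     if PySem.List.pyGetD cycle 0 0 = PySem.List.pyGetD cycle (-1) 0 ∧
          2 < PySem.List.len cycle then
        cc.insert [a, c, k] (PySem.List.slice cycle none (some (-1)))
     else cc)
    = (let ac := (PySem.List.pyRange 0 m 1).foldl
        (fun p _ => (PySem.Int.mod (a * p.1) m, PySem.Int.mod (a * p.2 + c) m))
        (PySem.Int.mod 1 m, 0)
       let periodic : PySem.Set Int := PySem.Set.ofList
        ((PySem.List.pyRange 0 m 1).map (fun x => PySem.Int.mod (ac.1 * x + ac.2) m))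
       if PySem.Set.contains periodic k then
          let orbit := pvBWalk m a c k m.toNat [k] (PySem.Int.mod (a * k + c) m)
          if 2 ≤ PySem.List.len orbit then cc.insert [a, c, k] orbit else cc
       else cc) := by
  simp only []
  set f := pvF m a c with hfdef
  have hf : ∀ x, 0 ≤ f x ∧ f x < m := fun x =>
    ⟨PySem.Int.mod_nonneg _ hm, PySem.Int.mod_lt _ hm⟩
  have hb := pvIter_bounds m f k hf hk
  obtain ⟨t0, ht0M, ht0⟩ := pvRepeat_exists m f k hm hb
  have hex : ∃ t, f^[t] k ∈ pvW f k t := ⟨t0, ht0⟩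
  set T := Nat.find hex with hTdef
  have hT : f^[T] k ∈ pvW f k T := Nat.find_spec hex
  have hTmin : ∀ t, t < T → f^[t] k ∉ pvW f k t := fun t ht => Nat.find_min hex ht
  have hT1 : 1 ≤ T := by
    rcases Nat.eq_zero_or_pos T with h | h
    · exfalso; rw [h] at hT; simp [pvW] at hT
    · exact h
  have hTM : T ≤ m.toNat := le_trans (Nat.find_min' hex ht0) ht0M
  have hM1 : 1 ≤ m.toNat := by omega
  -- A's loop result
  have hcycle : pvALoop ((PySem.List.pyRange 0 m 1).foldl
      (fun d x1 => d.insert x1 (PySem.Int.mod (a * x1 + c) m)) PySem.Dict.empty)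
      (m.toNat + 1) [k] = pvW f k (T + 1) := by
    rw [pvW_succ, ← pvW_one f k]
    exact pvALoop_run _ f k T
      (fun j hj => by
        rw [pvMapping_getD m a c _ (hb j), ← hfdef]
        exact (Function.iterate_succ_apply' f j k).symm)
      hT hTmin (m.toNat + 1) 1 le_rfl hT1 (by omega)
  rw [hcycle]
  have hhead : PySem.List.pyGetD (pvW f k (T + 1)) 0 0 = k := pvW_getD_zero f k (T+1) (by omega)
  have hlast : PySem.List.pyGetD (pvW f k (T + 1)) (-1) 0 = f^[T] k := by
    rw [pvW_getD_neg_one f k (T+1) (by omega)]; simp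
  have hlen : PySem.List.len (pvW f k (T + 1)) = (T : Int) + 1 := by
    rw [PySem.List.len_eq, pvW_length]; push_cast; ring
  have hslice : PySem.List.slice (pvW f k (T + 1)) none (some (-1)) = pvW f k T := by
    rw [PySem.List.slice_to_neg_one, pvW_succ, List.dropLast_concat]
  -- B's periodic-set membership
  have hcomp : ∀ x : Int, 0 ≤ x → x < m →
      PySem.Int.mod
        (((PySem.List.pyRange 0 m 1).foldl
            (fun p _ => (PySem.Int.mod (a * p.1) m, PySem.Int.mod (a * p.2 + c) m))
            (PySem.Int.mod 1 m, 0)).1 * x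
          + ((PySem.List.pyRange 0 m 1).foldl
            (fun p _ => (PySem.Int.mod (a * p.1) m, PySem.Int.mod (a * p.2 + c) m))
            (PySem.Int.mod 1 m, 0)).2) m = f^[m.toNat] x := by
    intro x hx0 hxm
    rw [pvFoldl_const, PySem.List.length_pyRange_one]
    have := pvLinear_iter m a c hm m.toNat x hx0 hxm
    simpa using this
  have hmem : PySem.Set.contains (PySem.Set.ofList
      ((PySem.List.pyRange 0 m 1).map (fun x => PySem.Int.mod
        (((PySem.List.pyRange 0 m 1).foldl
            (fun p _ => (PySem.Int.mod (a * p.1) m, PySem.Int.mod (a * p.2 + c) m))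
            (PySem.Int.mod 1 m, 0)).1 * x
          + ((PySem.List.pyRange 0 m 1).foldl
            (fun p _ => (PySem.Int.mod (a * p.1) m, PySem.Int.mod (a * p.2 + c) m))
            (PySem.Int.mod 1 m, 0)).2) m))) k = true
      ↔ ∃ j : Nat, 1 ≤ j ∧ f^[j] k = k := by
    rw [PySem.Set.contains_iff, PySem.Set.mem_ofList, List.mem_map]
    constructor
    · rintro ⟨x, hxmem, hxeq⟩
      obtain ⟨hx0, hxm⟩ := (PySem.List.mem_pyRange_one).1 hxmem
      rw [hcomp x hx0 hxm] at hxeq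
      exact pvPer_of_image m f x k hm (pvIter_bounds m f x hf ⟨hx0, hxm⟩) hxeq
    · rintro ⟨j, hj1, hj⟩
      obtain ⟨t, htt⟩ := pvImage_of_per f m.toNat j k hj1 hj
      refine ⟨f^[t] k, (PySem.List.mem_pyRange_one).2 ⟨(hb t).1, (hb t).2⟩, ?_⟩
      rw [hcomp _ (hb t).1 (hb t).2]
      exact htt
  by_cases hper : ∃ j : Nat, 1 ≤ j ∧ f^[j] k = k
  · -- periodic: both sides emit iff the least period is ≥ 2, with the same cycle list
    set p := Nat.find hper with hpdef
    have hp := Nat.find_spec hper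
    have hpmin : ∀ j, 1 ≤ j → j < p → f^[j] k ≠ k := fun j h1 h2 hne =>
      Nat.find_min hper h2 ⟨h1, hne⟩
    have hQp : f^[p] k ∈ pvW f k p := by
      rw [mem_pvW]; exact ⟨0, by omega, by simpa using hp.2.symm⟩
    have hTp : T ≤ p := Nat.find_min' hex hQp
    have hfix : T = p := by
      rcases Nat.eq_or_lt_of_le hTp with h | h
      · exact h
      · exfalso
        obtain ⟨i, hiT, hieq⟩ := (mem_pvW f k _ T).1 hT
        have he : f^[p - T + i] k = k := by
          have h0 : f^[p - T + T] k = k := by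
            rw [Nat.sub_add_cancel (le_of_lt h)]; exact hp.2
          rw [Function.iterate_add_apply, ← hieq, ← Function.iterate_add_apply] at h0
          exact h0
        exact hpmin (p - T + i) (by omega) (by omega) he
    have hfixk : f^[T] k = k := by rw [hfix]; exact hp.2
    rw [if_pos (hmem.2 hper)]
    have horbit : pvBWalk m a c k m.toNat [k] (PySem.Int.mod (a * k + c) m) = pvW f k T := by
      rw [← pvW_one f k]
      have hx1 : PySem.Int.mod (a * k + c) m = f^[1] k := by
        rw [Function.iterate_one]; rfl
      rw [hx1]
      exact pvBWalk_run m a c k T hfixk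
        (fun t h1 h2 => hpmin t h1 (by omega)) m.toNat 1 le_rfl hT1 (by omega)
    rw [horbit]
    have hlenW : PySem.List.len (pvW f k T) = (T : Int) := by
      rw [PySem.List.len_eq, pvW_length]
    rw [hhead, hlast, hfixk, hlen, hslice, hlenW]
    by_cases h2 : 2 ≤ T
    · rw [if_pos ⟨rfl, by omega⟩, if_pos (by omega)]
    · rw [if_neg, if_neg]
      · omega
      · rintro ⟨-, hc2⟩; omega
  · -- not periodic: neither side emits
    have hA : ¬(PySem.List.pyGetD (pvW f k (T + 1)) 0 0 = PySem.List.pyGetD (pvW f k (T + 1)) (-1) 0 ∧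
        2 < PySem.List.len (pvW f k (T + 1))) := by
      rintro ⟨hc1, -⟩
      rw [hhead, hlast] at hc1
      exact hper ⟨T, hT1, hc1.symm⟩
    rw [if_neg hA, if_neg (fun hcon => hper (hmem.1 hcon))]

-- ===== VERDICT (by name: the statement is the Claim_ definition above) =====
theorem get_one_full_cycle_spec : Claim_equal_get_one_full_cycle := by
  intro m _
  unfold Spec_get_one_full_cycle get_one_full_cycle get_one_full_cycle_alt
  congr 1
  apply PySem.List.foldl_congr_mem
  intro cc a ha
  apply PySem.List.foldl_congr_mem
  intro cc' c hc
  obtain ⟨ha0, ham⟩ := (PySem.List.mem_pyRange_one).1 ha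
  have hm : 0 < m := lt_of_le_of_lt ha0 ham
  simp only [pvMapping_keys]
  apply PySem.List.foldl_congr_mem
  intro cc'' k hkm
  obtain ⟨hk0, hkm'⟩ := (PySem.List.mem_pyRange_one).1 hkm
  exact pvStep_eq m a c k hm ⟨hk0, hkm'⟩ cc''
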